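-- pv_equiv track=rewrite | github.com/AnnieChmarak/aoc | 19.py | _simplify_rules
-- ===== SOURCE A (Python) =====
-- from typing import Optional
--
-- WorkflowRule = tuple[str, str, int]
--
-- def _simplify_rules(rules: set[WorkflowRule]) -> dict[str: tuple[Optional[int], Optional[int]]]:
--     simplified_rules = {}
--     for current_part in 'xmas':
--         min_value = None
--         max_value = None
--         for part, comp, req_value in rules:
--             if part == current_part:
--                 if comp == '<':
--                     max_value = min(max_value, req_value - 1) if max_value else req_value - 1
--                 elif comp == '<=':
--                     max_value = min(max_value, req_value) if max_value else req_value
--                 elif comp == '>':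
--                     min_value = max(min_value, req_value + 1) if min_value else req_value + 1
--                 elif comp == '>=':
--                     min_value = max(min_value, req_value) if min_value else req_value
--         simplified_rules[current_part] = (min_value, max_value)
--     return simplified_rules
-- ===== SOURCE B (Python) =====
-- from typing import Optional
--
-- WorkflowRule = tuple[str, str, int]
--
-- def _simplify_rules(rules: set[WorkflowRule]) -> dict[str: tuple[Optional[int], Optional[int]]]:
--     # One pass over the rules, keeping per-part (min, max) in a pre-keyed dict.
--     state = {p: (None, None) for p in 'xmas'}
--     for part, comp, req_value in rules:
--         if part in state:
--             min_value, max_value = state[part]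
--             if comp == '<':
--                 max_value = min(max_value, req_value - 1) if max_value else req_value - 1
--             elif comp == '<=':
--                 max_value = min(max_value, req_value) if max_value else req_value
--             elif comp == '>':
--                 min_value = max(min_value, req_value + 1) if min_value else req_value + 1
--             elif comp == '>=':
--                 min_value = max(min_value, req_value) if min_value else req_value
--             state[part] = (min_value, max_value)
--     return state
-- ===== Notes on version B (the rewrite author's own statement) =====
-- stated objective: simpler
-- what changed: B replaces A's nested scan (for each of 'xmas', rescan all rules) by a single pass over the rules updating a pre-keyed dict of (min, max) bounds.
import Mathlib
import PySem

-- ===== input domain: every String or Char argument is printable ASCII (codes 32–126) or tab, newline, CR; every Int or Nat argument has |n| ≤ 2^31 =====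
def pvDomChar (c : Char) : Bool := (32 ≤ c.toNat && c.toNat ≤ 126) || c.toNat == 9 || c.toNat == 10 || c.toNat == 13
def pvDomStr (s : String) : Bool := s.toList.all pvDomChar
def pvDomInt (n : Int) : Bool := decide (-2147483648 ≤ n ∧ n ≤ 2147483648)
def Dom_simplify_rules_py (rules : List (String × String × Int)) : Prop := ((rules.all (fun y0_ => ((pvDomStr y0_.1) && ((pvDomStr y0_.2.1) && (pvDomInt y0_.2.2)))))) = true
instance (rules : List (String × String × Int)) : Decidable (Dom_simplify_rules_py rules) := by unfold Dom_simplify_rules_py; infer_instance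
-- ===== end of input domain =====

-- B replaces A's nested scan (per letter of 'xmas', rescan all rules) by one pass over the rules
-- updating a pre-keyed dict of (min, max) bounds; objective: simpler (same behaviour, incl. the
-- zero-is-falsy reset guards).


-- shared branch helpers: both Python sources contain literally these four comparison branches,
-- including the 'if max_value' / 'if min_value' truthiness guards (0 resets instead of combining)
def pvCombMin (mx : Option Int) (r : Int) : Int :=
  match mx with
  | some v => if v = 0 then r else min v r
  | none => r

def pvCombMax (mn : Option Int) (r : Int) : Int :=
  match mn with
  | some v => if v = 0 then r else max v r
  | none => r

def pvStep (comp : String) (req : Int) (st : Option Int × Option Int) : Option Int × Option Int :=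
  if comp == "<" then (st.1, some (pvCombMin st.2 (req - 1)))
  else if comp == "<=" then (st.1, some (pvCombMin st.2 req))
  else if comp == ">" then (some (pvCombMax st.1 (req + 1)), st.2)
  else if comp == ">=" then (some (pvCombMax st.1 req), st.2)
  else st

-- ===== PORT A =====
-- A: for each current_part in 'xmas', inner loop over all rules accumulating (min_value, max_value)
def pvBoundsFor (c : String) (rules : List (String × String × Int)) : Option Int × Option Int :=
  rules.foldl (fun st r => if r.1 == c then pvStep r.2.1 r.2.2 st else st) (none, none)

def simplify_rules_py (rules : List (String × String × Int)) : List (String × Option Int × Option Int) :=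
  ["x", "m", "a", "s"].map (fun c => (c, pvBoundsFor c rules))

-- ===== PORT B =====
-- B: single pass over the rules, state = dict pre-keyed with 'xmas'; rules whose part is not a key are skipped
def simplify_rules_py_alt (rules : List (String × String × Int)) : List (String × Option Int × Option Int) :=
  let init : PySem.Dict String (Option Int × Option Int) :=
    PySem.Dict.mk [("x", (none, none)), ("m", (none, none)), ("a", (none, none)), ("s", (none, none))]
  let final := rules.foldl (fun d r =>
    match PySem.Dict.get? d r.1 with
    | none => d
    | some st => PySem.Dict.insert d r.1 (pvStep r.2.1 r.2.2 st)) init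
  final.items

-- ===== PRECONDITION & SPEC =====
def Spec_simplify_rules_py (rules : List (String × String × Int)) (out : List (String × Option Int × Option Int)) : Prop := out = simplify_rules_py_alt rules
instance (rules : List (String × String × Int)) (out : List (String × Option Int × Option Int)) : Decidable (Spec_simplify_rules_py rules out) := by unfold Spec_simplify_rules_py; infer_instance

-- ===== CLAIM (what is proved, stated in full; the proofs are below) =====
def Claim_equal_simplify_rules_py : Prop := ∀ (rules : List (String × String × Int)), Dom_simplify_rules_py rules → Spec_simplify_rules_py rules (simplify_rules_py rules)

-- ===== LEMMAS AND PROOFS =====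

-- B's fold, started from any 4-state dict keyed x,m,a,s, is the componentwise continuation of A's inner folds
-- B's fold, started from any 4-state dict keyed x,m,a,s, is the componentwise continuation of A's inner folds
theorem pv_fold_inv (l : List (String × String × Int)) (sx sm sa ss : Option Int × Option Int) :
    l.foldl (fun d r =>
      match PySem.Dict.get? d r.1 with
      | none => d
      | some st => PySem.Dict.insert d r.1 (pvStep r.2.1 r.2.2 st))
      (PySem.Dict.mk [("x", sx), ("m", sm), ("a", sa), ("s", ss)])
    = PySem.Dict.mk
        [("x", l.foldl (fun st r => if r.1 == "x" then pvStep r.2.1 r.2.2 st else st) sx),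
         ("m", l.foldl (fun st r => if r.1 == "m" then pvStep r.2.1 r.2.2 st else st) sm),
         ("a", l.foldl (fun st r => if r.1 == "a" then pvStep r.2.1 r.2.2 st else st) sa),
         ("s", l.foldl (fun st r => if r.1 == "s" then pvStep r.2.1 r.2.2 st else st) ss)] := by
  induction l generalizing sx sm sa ss with
  | nil => rfl
  | cons hd tl ih =>
    obtain ⟨p, c, r⟩ := hd
    rw [List.foldl_cons]
    by_cases hx : p = "x"
    · subst hx; exact ih (pvStep c r sx) sm sa ss
    · by_cases hm : p = "m"
      · subst hm; exact ih sx (pvStep c r sm) sa ss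
      · by_cases ha : p = "a"
        · subst ha; exact ih sx sm (pvStep c r sa) ss
        · by_cases hs : p = "s"
          · subst hs; exact ih sx sm sa (pvStep c r ss)
          · have bx : ("x" == p) = false := by simp [Ne.symm hx]
            have bm : ("m" == p) = false := by simp [Ne.symm hm]
            have ba : ("a" == p) = false := by simp [Ne.symm ha]
            have bs : ("s" == p) = false := by simp [Ne.symm hs]
            have hget : PySem.Dict.get?
                (PySem.Dict.mk [("x", sx), ("m", sm), ("a", sa), ("s", ss)]) p = none := by
              simp [PySem.Dict.get?, List.find?, bx, bm, ba, bs]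
            simpa [hget, hx, hm, ha, hs] using ih sx sm sa ss

-- ===== VERDICT (by name: the statement is the Claim_ definition above) =====
theorem simplify_rules_py_spec : Claim_equal_simplify_rules_py := by
  intro rules _
  unfold Spec_simplify_rules_py
  simp only [simplify_rules_py, simplify_rules_py_alt, pvBoundsFor]
  rw [pv_fold_inv]
  rfl
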